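-- pv_equiv track=rewrite | github.com/SeedOfEvil/VoxeraOS | src/voxera/voice/speech_chunking.py | _is_real_sentence_end
-- ===== SOURCE A (Python) =====
-- _ABBREVIATIONS: frozenset[str] = frozenset(
--     {
--         "dr",
--         "mr",
--         "mrs",
--         "ms",
--         "prof",
--         "sr",
--         "jr",
--         "st",
--         "vs",
--         "etc",
--         "e.g",
--         "i.e",
--         "no",
--         "fig",
--         "vol",
--         "approx",
--     }
-- )
--
-- def _is_real_sentence_end(text: str, match_start: int, terminator: str) -> bool:
--     """Return True when ``terminator`` at ``match_start`` ends a sentence.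
--
--     Filters out abbreviation-style ``.`` endings like ``Dr.`` /
--     ``e.g.`` / ``U.S.`` where the next character is a space but the
--     preceding token is a known abbreviation or an initialism.
--     Compound terminators (``?!``, ``!!``) are always sentence ends
--     because no abbreviation uses them.
--     """
--     if terminator and any(ch in terminator for ch in "!?"):
--         return True
--     # Look back at the word preceding the ``.`` to check for
--     # abbreviations / initialisms.  We collect trailing letters and
--     # remember whether we skipped any interior periods -- a period
--     # embedded in the preceding token (``e.g.`` / ``U.S.``) is a
--     # strong signal that the ``.`` at ``match_start`` is part of the
--     # same abbreviation, not a real sentence end.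
--     i = match_start - 1
--     trailing: list[str] = []
--     saw_interior_period = False
--     while i >= 0:
--         ch = text[i]
--         if ch.isalpha():
--             trailing.append(ch)
--             i -= 1
--         elif ch == "." and trailing:
--             saw_interior_period = True
--             i -= 1
--         else:
--             break
--     if saw_interior_period:
--         return False
--     word = "".join(reversed(trailing)).lower()
--     if not word:
--         return True
--     return word not in _ABBREVIATIONS
-- ===== SOURCE B (Python) =====
-- _ABBREVIATIONS: frozenset[str] = frozenset(
--     {
--         "dr", "mr", "mrs", "ms", "prof", "sr", "jr", "st", "vs", "etc",
--         "e.g", "i.e", "no", "fig", "vol", "approx",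
--     }
-- )
--
-- _LETTERS_AND_DOT = "ABCDEFGHIJKLMNOPQRSTUVWXYZabcdefghijklmnopqrstuvwxyz."
--
--
-- def _is_real_sentence_end(text: str, match_start: int, terminator: str) -> bool:
--     """Terminator with '!' or '?' always ends a sentence; otherwise classify
--     the maximal run of letters/dots immediately before the match position."""
--     if "!" in terminator or "?" in terminator:
--         return True
--     prefix = text[: max(match_start, 0)]
--     token = prefix[len(prefix.rstrip(_LETTERS_AND_DOT)) :]
--     if not token or token.endswith("."):
--         # nothing alphabetic right before the '.', or a bare '.' run: sentence end
--         return True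
--     if "." in token:
--         # interior period: part of an initialism / dotted abbreviation
--         return False
--     return token.lower() not in _ABBREVIATIONS
-- ===== Notes on version B (the rewrite author's own statement) =====
-- stated objective: simpler
-- what changed: A's stateful backward character scan (trailing-letters accumulator plus interior-period flag with three break/continue cases) is replaced by extracting the maximal trailing run of letters/dots via rstrip and classifying that token with flat conditionals (empty or ends in dot / contains dot / abbreviation lookup).
import Mathlib
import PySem

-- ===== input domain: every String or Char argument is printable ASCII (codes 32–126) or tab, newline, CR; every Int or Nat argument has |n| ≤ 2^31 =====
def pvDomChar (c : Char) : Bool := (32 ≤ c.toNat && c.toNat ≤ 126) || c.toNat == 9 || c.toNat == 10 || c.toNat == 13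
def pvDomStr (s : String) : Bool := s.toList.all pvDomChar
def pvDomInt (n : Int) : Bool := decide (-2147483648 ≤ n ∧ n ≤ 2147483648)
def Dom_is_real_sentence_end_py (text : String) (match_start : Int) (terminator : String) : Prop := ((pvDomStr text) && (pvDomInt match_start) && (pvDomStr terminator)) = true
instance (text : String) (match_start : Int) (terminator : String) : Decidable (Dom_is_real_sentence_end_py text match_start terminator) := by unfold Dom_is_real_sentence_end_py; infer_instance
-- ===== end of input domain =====

-- B replaces A's stateful backward scan (trailing letters + interior-period flag) by
-- extracting the maximal trailing run of letters/dots (rstrip-style) and classifying it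
-- with flat conditionals; objective: simpler.


-- ===== PORT A =====
-- _ABBREVIATIONS (as a list of char lists; frozenset membership = list membership)
def pvAbbrevs : List (List Char) :=
  [['d','r'], ['m','r'], ['m','r','s'], ['m','s'], ['p','r','o','f'], ['s','r'], ['j','r'],
   ['s','t'], ['v','s'], ['e','t','c'], ['e','.','g'], ['i','.','e'], ['n','o'],
   ['f','i','g'], ['v','o','l'], ['a','p','p','r','o','x']]

-- A's backward while-loop: it reads text[match_start-1], text[match_start-2], …, text[0],
-- i.e. it walks the reversed prefix text[:match_start]; state = (trailing, saw_interior_period).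
def pvALoop : List Char → List Char → Bool → List Char × Bool
  | [], trailing, saw => (trailing, saw)
  | ch :: rest, trailing, saw =>
    if PySem.Chars.isalpha ch then pvALoop rest (trailing ++ [ch]) saw
    else if ch == '.' && !trailing.isEmpty then pvALoop rest trailing true
    else (trailing, saw)

def is_real_sentence_end_py (text : String) (match_start : Int) (terminator : String) : Bool :=
  -- if terminator and any(ch in terminator for ch in "!?"): return True
  if !terminator.toList.isEmpty && (terminator.toList.contains '!' || terminator.toList.contains '?') then true
  else
    -- the loop visits exactly the chars of text[:match_start] right-to-left (none if match_start ≤ 0)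
    let res := pvALoop ((text.toList.take (max match_start 0).toNat).reverse) [] false
    if res.2 then false
    else
      let word := PySem.Chars.lower res.1.reverse
      if word = [] then true
      else !(pvAbbrevs.contains word)

-- ===== PORT B =====
def pvLettersAndDot : List Char := "ABCDEFGHIJKLMNOPQRSTUVWXYZabcdefghijklmnopqrstuvwxyz.".toList

def is_real_sentence_end_py_alt (text : String) (match_start : Int) (terminator : String) : Bool :=
  if terminator.toList.contains '!' || terminator.toList.contains '?' then true
  else
    let prefixL := text.toList.take (max match_start 0).toNat
    -- prefix[len(prefix.rstrip(_LETTERS_AND_DOT)):] — the maximal trailing run of letters/dots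
    let token := (prefixL.reverse.takeWhile (fun c => pvLettersAndDot.contains c)).reverse
    if token.isEmpty || token.getLast? == some '.' then true
    else if token.contains '.' then false
    else !(pvAbbrevs.contains (PySem.Chars.lower token))

-- ===== PRECONDITION & SPEC =====
-- Pre_ excludes exactly the inputs where A raises IndexError: match_start > len(text) with no
-- '!'/'?' in the terminator (there the backward scan starts past the end of the string).
def Pre_is_real_sentence_end_py (text : String) (match_start : Int) (terminator : String) : Prop :=
  match_start ≤ (text.toList.length : Int) ∨ '!' ∈ terminator.toList ∨ '?' ∈ terminator.toList
instance (text : String) (match_start : Int) (terminator : String) : Decidable (Pre_is_real_sentence_end_py text match_start terminator) := by unfold Pre_is_real_sentence_end_py; infer_instance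

def pvWitness_is_real_sentence_end_py : String × Int × String := ("Dr. Who", 2, ".")

def Spec_is_real_sentence_end_py (text : String) (match_start : Int) (terminator : String) (out : Bool) : Prop := out = is_real_sentence_end_py_alt text match_start terminator
instance (text : String) (match_start : Int) (terminator : String) (out : Bool) : Decidable (Spec_is_real_sentence_end_py text match_start terminator out) := by unfold Spec_is_real_sentence_end_py; infer_instance

-- ===== CLAIM (what is proved, stated in full; the proofs are below) =====
def Claim_equal_is_real_sentence_end_py : Prop := ∀ (text : String) (match_start : Int) (terminator : String), Dom_is_real_sentence_end_py text match_start terminator → Pre_is_real_sentence_end_py text match_start terminator → Spec_is_real_sentence_end_py text match_start terminator (is_real_sentence_end_py text match_start terminator)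

-- ===== LEMMAS AND PROOFS =====

-- the character class both programs test, written A's way
def pvOk (c : Char) : Bool := PySem.Chars.isalpha c || c == '.'

-- on domain chars, membership in B's letters-and-dot string is A's isalpha-or-dot test
set_option maxRecDepth 4096 in
lemma pvOk_eq_of_dom (c : Char) (h : pvDomChar c = true) :
    pvLettersAndDot.contains c = pvOk c := by
  have hall : ∀ n : Nat, n ≤ 126 →
      pvLettersAndDot.contains (Char.ofNat n) = pvOk (Char.ofNat n) := by decide
  have hc : c.toNat ≤ 126 := by
    simp [pvDomChar] at h
    omega
  simpa [Char.ofNat_toNat] using hall c.toNat hc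

lemma takeWhile_congr_mem {p q : Char → Bool} {l : List Char}
    (h : ∀ x ∈ l, p x = q x) : l.takeWhile p = l.takeWhile q := by
  induction l with
  | nil => rfl
  | cons a l ih =>
    have ha := h a (by simp)
    by_cases hp : p a
    · rw [List.takeWhile_cons_of_pos hp, List.takeWhile_cons_of_pos (ha ▸ hp),
        ih fun x hx => h x (by simp [hx])]
    · rw [List.takeWhile_cons_of_neg hp, List.takeWhile_cons_of_neg (fun hq => hp (ha ▸ hq))]

lemma isalpha_ne_dot (c : Char) (h : PySem.Chars.isalpha c = true) : c ≠ '.' := by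
  intro hc; rw [hc] at h; exact absurd h (by decide)

-- A's loop with a nonempty trailing list: it consumes the maximal pvOk-prefix, appends its
-- letters, and sets the flag iff that prefix contains a dot.
lemma pvALoop_inv (r : List Char) : ∀ (tr : List Char) (saw : Bool), tr ≠ [] →
    pvALoop r tr saw =
      (tr ++ (r.takeWhile pvOk).filter PySem.Chars.isalpha,
       saw || (r.takeWhile pvOk).contains '.') := by
  induction r with
  | nil => intro tr saw _; simp [pvALoop]
  | cons c rest ih =>
    intro tr saw htr
    by_cases hα : PySem.Chars.isalpha c = true
    · have hok : pvOk c = true := by simp [pvOk, hα]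
      have hcd : ('.' == c) = false := beq_eq_false_iff_ne.mpr (Ne.symm (isalpha_ne_dot c hα))
      simp only [pvALoop, hα, if_true, ih (tr ++ [c]) saw (by simp),
        List.takeWhile_cons_of_pos hok, List.filter_cons, List.contains_cons]
      simp [hcd]
    · by_cases hdot : c = '.'
      · subst hdot
        have ha : PySem.Chars.isalpha '.' = false := by decide
        have hne : tr.isEmpty = false := by simpa [List.isEmpty_iff] using htr
        have hok' : pvOk '.' = true := by decide
        simp only [pvALoop, ha, Bool.false_eq_true, if_false, beq_self_eq_true,
          hne, Bool.not_false, Bool.and_true, if_true, ih tr true htr,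
          List.takeWhile_cons_of_pos hok', List.filter_cons, List.contains_cons]
        simp
      · have hok : pvOk c = false := by simp [pvOk, hα, hdot]
        have hcd : (c == '.') = false := beq_eq_false_iff_ne.mpr hdot
        rw [List.takeWhile_cons_of_neg (by simp [hok])]
        simp [pvALoop, hα, hcd]

-- the two else-branches agree on any domain prefix, scanned right-to-left as its reverse r
lemma branch_eq (r : List Char) (hdom : ∀ c ∈ r, pvDomChar c = true) :
    (let res := pvALoop r [] false;
     if res.2 then false
     else
       let word := PySem.Chars.lower res.1.reverse
       if word = [] then true
       else !(pvAbbrevs.contains word)) =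
    (let token := (r.takeWhile (fun c => pvLettersAndDot.contains c)).reverse;
     if token.isEmpty || token.getLast? == some '.' then true
     else if token.contains '.' then false
     else !(pvAbbrevs.contains (PySem.Chars.lower token))) := by
  have htw : r.takeWhile (fun c => pvLettersAndDot.contains c) = r.takeWhile pvOk :=
    takeWhile_congr_mem (fun x hx => pvOk_eq_of_dom x (hdom x hx))
  simp only [htw]
  cases r with
  | nil => simp [pvALoop, PySem.Chars.lower]
  | cons c rest =>
    by_cases hα : PySem.Chars.isalpha c = true
    · have hok : pvOk c = true := by simp [pvOk, hα]
      have hcd : c ≠ '.' := isalpha_ne_dot c hα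
      have hloop : pvALoop (c :: rest) [] false =
          ([c] ++ (rest.takeWhile pvOk).filter PySem.Chars.isalpha,
           (rest.takeWhile pvOk).contains '.') := by
        simp only [pvALoop, hα, if_true]
        rw [show ([] : List Char) ++ [c] = [c] from rfl] at *
        rw [pvALoop_inv rest [c] false (by simp)]
        simp
      simp only [hloop, List.takeWhile_cons_of_pos hok]
      set t := rest.takeWhile pvOk with ht
      have h2 : ((c :: t).reverse).getLast? = some c := by
        simp [List.getLast?_reverse]
      by_cases hdotmem : t.contains '.' = true
      · -- interior period: A returns false; token ends in the letter c and contains a dot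
        have hmem : '.' ∈ t := List.contains_iff_mem.mp hdotmem
        simp [hmem, hcd, Ne.symm hcd]
      · -- no interior period: the run is all letters, both test the same lowered word
        have hfilter : t.filter PySem.Chars.isalpha = t := by
          rw [List.filter_eq_self]
          intro x hx
          have hxok : pvOk x = true := List.mem_takeWhile_imp (ht ▸ hx)
          have hxd : x ≠ '.' := by
            intro hxe
            rw [hxe] at hx
            exact hdotmem (List.contains_iff_mem.mpr hx)
          simpa [pvOk, hxd] using hxok
        have hnot : '.' ∉ t := fun hm => hdotmem (List.contains_iff_mem.mpr hm)
        have h4 : PySem.Chars.lower ((c :: t).reverse) ≠ [] := by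
          simp [PySem.Chars.lower]
        simp [hnot, hfilter, hcd, Ne.symm hcd]
        intro hemp
        exact absurd hemp (by simp [PySem.Chars.lower])
    · by_cases hdot : c = '.'
      · -- run starts (from the right) with a dot: A breaks before collecting any letter,
        -- B sees a token ending in '.'
        have hok : pvOk c = true := by simp [pvOk, hdot]
        have hloop : pvALoop (c :: rest) [] false = ([], false) := by
          simp [pvALoop, hα]
        have h2 : ((c :: rest.takeWhile pvOk).reverse).getLast? = some c := by
          simp [List.getLast?_reverse]
        rw [hloop, List.takeWhile_cons_of_pos hok]
        simp [PySem.Chars.lower, hdot]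
      · -- char before the match is neither letter nor dot: both see the empty token
        have hok : pvOk c = false := by simp [pvOk, hα, hdot]
        have hloop : pvALoop (c :: rest) [] false = ([], false) := by
          simp [pvALoop, hα, hdot]
        rw [hloop, List.takeWhile_cons_of_neg (by simp [hok])]
        simp [PySem.Chars.lower]

-- the leading '!?' guards of the two ports are the same Boolean test
lemma cond_eq (l : List Char) :
    (!l.isEmpty && (l.contains '!' || l.contains '?')) = (l.contains '!' || l.contains '?') := by
  cases l <;> simp

-- ===== VERDICT (by name: the statement is the Claim_ definition above) =====
theorem is_real_sentence_end_py_spec : Claim_equal_is_real_sentence_end_py := by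
  intro text match_start terminator hdom _hpre
  unfold Spec_is_real_sentence_end_py is_real_sentence_end_py is_real_sentence_end_py_alt
  rw [cond_eq]
  by_cases h : (terminator.toList.contains '!' || terminator.toList.contains '?') = true
  · rw [if_pos h, if_pos h]
  · rw [if_neg h, if_neg h]
    have hdomtext : ∀ c ∈ (text.toList.take (max match_start 0).toNat).reverse,
        pvDomChar c = true := by
      intro c hc
      have hmem : c ∈ text.toList := List.mem_of_mem_take (List.mem_reverse.mp hc)
      have hs : pvDomStr text = true := by
        unfold Dom_is_real_sentence_end_py at hdom
        simp only [Bool.and_eq_true] at hdom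
        exact hdom.1.1
      have hall : ∀ x ∈ text.toList, pvDomChar x = true := by
        simpa [pvDomStr, List.all_eq_true] using hs
      exact hall c hmem
    exact branch_eq _ hdomtext
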